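-- pv_equiv track=rewrite | github.com/ibachman/thesis_experiments | data_proc/logic_network_analysis.py | histogram_for_bridge_nodes
-- ===== SOURCE A (Python) =====
-- def histogram_for_bridge_nodes(nodes_data_list, personalized_buckets):
--     buckets = []
--     buckets_providers = []
--     hist_providers =[]
--     for i in range(300):
--         buckets.append(0)
--         buckets_providers.append(0)
--     for nodes_data in nodes_data_list:
--         for node in nodes_data.keys():
--             nodes_lost = int(nodes_data[node]["nodes_lost"])
--             buckets[nodes_lost] += 1
--             if nodes_data[node]["is_provider"]:
--                 buckets_providers[nodes_lost] += 1
--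
--     final_histogram = []
--     for b in personalized_buckets:
--         sum = 0
--         sum_prov = 0
--         for i in range(b[0], b[1]+1):
--             sum += buckets[i]
--             sum_prov += buckets_providers[i]
--         final_histogram.append(sum)
--         hist_providers.append(sum_prov)
--
--     return final_histogram, hist_providers
-- ===== SOURCE B (Python) =====
-- def histogram_for_bridge_nodes(nodes_data_list, personalized_buckets):
--     buckets = [0] * 300
--     buckets_providers = [0] * 300
--     for nodes_data in nodes_data_list:
--         for node, rec in nodes_data.items():
--             nodes_lost = int(rec["nodes_lost"])
--             buckets[nodes_lost] += 1
--             if rec["is_provider"]: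
--                 buckets_providers[nodes_lost] += 1
--     prefix, run = [0], 0
--     prefix_prov, run_prov = [0], 0
--     for x in buckets:
--         run += x
--         prefix.append(run)
--     for x in buckets_providers:
--         run_prov += x
--         prefix_prov.append(run_prov)
--     final_histogram = []
--     hist_providers = []
--     for p, q in personalized_buckets:
--         lo = max(p, 0)
--         hi = min(q, 299)
--         if lo <= hi:
--             final_histogram.append(prefix[hi + 1] - prefix[lo])
--             hist_providers.append(prefix_prov[hi + 1] - prefix_prov[lo])
--         else:
--             final_histogram.append(0)
--             hist_providers.append(0)
--     return final_histogram, hist_providers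
-- ===== Notes on version B (the rewrite author's own statement) =====
-- stated objective: faster
-- what changed: B keeps the O(N) counting pass but replaces A's per-bucket inner loop over range(b[0], b[1]+1) with prefix-sum arrays, answering each personalized bucket in O(1) via prefix[hi+1]-prefix[lo] with the range clamped to [0,299].
-- intended difference: On personalized buckets whose nonempty range starts at a negative index while some node's loss count lands in the wrapped top cells, A silently adds counts from the top of the 300-cell array via Python negative indexing; B counts only losses actually in [max(p,0), q], which is the intended histogram value. — e.g. on histogram_for_bridge_nodes([[("a", [("nodes_lost", "299"), ("is_provider", "x")])]], [(-1, 0)]): A returns ([1], [1]), B returns ([0], [0])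
import Mathlib
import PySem

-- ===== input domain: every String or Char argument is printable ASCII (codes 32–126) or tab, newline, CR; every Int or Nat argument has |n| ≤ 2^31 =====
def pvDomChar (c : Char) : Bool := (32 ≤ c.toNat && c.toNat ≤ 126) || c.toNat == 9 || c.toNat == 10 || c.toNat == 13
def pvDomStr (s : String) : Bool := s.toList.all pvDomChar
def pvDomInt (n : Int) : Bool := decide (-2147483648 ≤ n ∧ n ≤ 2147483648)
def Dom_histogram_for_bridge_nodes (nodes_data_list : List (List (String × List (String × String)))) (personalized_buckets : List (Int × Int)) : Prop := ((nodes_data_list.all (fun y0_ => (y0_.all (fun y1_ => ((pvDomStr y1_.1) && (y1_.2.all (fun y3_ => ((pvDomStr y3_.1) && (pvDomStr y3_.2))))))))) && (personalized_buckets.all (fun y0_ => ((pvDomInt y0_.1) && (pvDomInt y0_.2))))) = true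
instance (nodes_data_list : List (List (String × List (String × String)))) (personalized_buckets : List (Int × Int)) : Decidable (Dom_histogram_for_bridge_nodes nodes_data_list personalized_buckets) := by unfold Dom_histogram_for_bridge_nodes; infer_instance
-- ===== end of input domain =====

set_option maxRecDepth 8000

-- B keeps A's counting pass but answers each personalized bucket in O(1) from prefix-sum arrays
-- instead of A's inner summation loop; return-value equivalence only.

-- ===== PORT A =====
def histogram_for_bridge_nodes (nodes_data_list : List (List (String × List (String × String)))) (personalized_buckets : List (Int × Int)) : List Int × List Int :=
  let init : List Int × List Int :=
    (PySem.List.pyRange 0 300 1).foldl (fun acc _ => (acc.1 ++ [(0:Int)], acc.2 ++ [(0:Int)])) ([], [])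
  let counted : List Int × List Int :=
    nodes_data_list.foldl (fun acc nodes_data =>
      ((PySem.Dict.mk nodes_data).keys).foldl (fun acc node =>
        let nodes_lost : Int :=
          (PySem.Int.ofStr? ((PySem.Dict.mk ((PySem.Dict.mk nodes_data).getD node [])).getD "nodes_lost" "")).getD 0
        let b1 := PySem.List.pySetD acc.1 nodes_lost (PySem.List.pyGetD acc.1 nodes_lost 0 + 1)
        let b2 := if ((PySem.Dict.mk ((PySem.Dict.mk nodes_data).getD node [])).getD "is_provider" "") ≠ "" then
            PySem.List.pySetD acc.2 nodes_lost (PySem.List.pyGetD acc.2 nodes_lost 0 + 1)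
          else acc.2
        (b1, b2)) acc) init
  personalized_buckets.foldl (fun acc b =>
    let s := (PySem.List.pyRange b.1 (b.2 + 1) 1).foldl
      (fun s i => (s.1 + PySem.List.pyGetD counted.1 i 0, s.2 + PySem.List.pyGetD counted.2 i 0)) ((0:Int), (0:Int))
    (acc.1 ++ [s.1], acc.2 ++ [s.2])) ([], [])

-- ===== PORT B =====
def histogram_for_bridge_nodes_alt (nodes_data_list : List (List (String × List (String × String)))) (personalized_buckets : List (Int × Int)) : List Int × List Int :=
  let counted : List Int × List Int :=
    nodes_data_list.foldl (fun acc nodes_data =>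
      ((PySem.Dict.mk nodes_data).items).foldl (fun acc kv =>
        let nodes_lost : Int := (PySem.Int.ofStr? ((PySem.Dict.mk kv.2).getD "nodes_lost" "")).getD 0
        let b1 := PySem.List.pySetD acc.1 nodes_lost (PySem.List.pyGetD acc.1 nodes_lost 0 + 1)
        let b2 := if ((PySem.Dict.mk kv.2).getD "is_provider" "") ≠ "" then
            PySem.List.pySetD acc.2 nodes_lost (PySem.List.pyGetD acc.2 nodes_lost 0 + 1)
          else acc.2
        (b1, b2)) acc)
      (PySem.List.pyRepeat [(0:Int)] 300, PySem.List.pyRepeat [(0:Int)] 300)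
  let pr1 := counted.1.foldl (fun pr x => (pr.1 ++ [pr.2 + x], pr.2 + x)) ([(0:Int)], (0:Int))
  let pr2 := counted.2.foldl (fun pr x => (pr.1 ++ [pr.2 + x], pr.2 + x)) ([(0:Int)], (0:Int))
  personalized_buckets.foldl (fun acc b =>
    let lo := max b.1 0
    let hi := min b.2 299
    if lo ≤ hi then
      (acc.1 ++ [PySem.List.pyGetD pr1.1 (hi + 1) 0 - PySem.List.pyGetD pr1.1 lo 0],
       acc.2 ++ [PySem.List.pyGetD pr2.1 (hi + 1) 0 - PySem.List.pyGetD pr2.1 lo 0])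
    else (acc.1 ++ [(0:Int)], acc.2 ++ [(0:Int)])) ([], [])

-- ===== PRECONDITION & SPEC =====
-- the integer the record's "nodes_lost" field denotes, if any (lookup = first match)
def pvLost (r : List (String × String)) : Option Int :=
  (r.lookup "nodes_lost").bind PySem.Int.ofStr?

def pvRecOk (r : List (String × String)) : Bool :=
  (match pvLost r with
   | some n => decide (-300 ≤ n ∧ n ≤ 299)
   | none => false) && (r.lookup "is_provider").isSome

-- Pre_ excludes exactly the inputs where A raises: a record missing "nodes_lost"/"is_provider" or whose
-- "nodes_lost" does not denote an int in [-300, 299] (KeyError/ValueError/IndexError), and a nonempty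
-- personalized bucket reaching outside [-300, 299] (IndexError); duplicate keys inside one nodes_data
-- dict cannot arise from a Python dict, so such association lists are excluded too.
def Pre_histogram_for_bridge_nodes (nodes_data_list : List (List (String × List (String × String)))) (personalized_buckets : List (Int × Int)) : Prop :=
  (nodes_data_list.all fun nd => decide ((nd.map Prod.fst).Nodup) && nd.all fun kv => pvRecOk kv.2) = true ∧
  (personalized_buckets.all fun b => decide (b.2 < b.1) || (decide (-300 ≤ b.1) && decide (b.2 ≤ 299))) = true

instance (nodes_data_list : List (List (String × List (String × String)))) (personalized_buckets : List (Int × Int)) : Decidable (Pre_histogram_for_bridge_nodes nodes_data_list personalized_buckets) := by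
  unfold Pre_histogram_for_bridge_nodes; infer_instance

def pvWitness_histogram_for_bridge_nodes : (List (List (String × List (String × String)))) × (List (Int × Int)) :=
  ([[("a", [("nodes_lost", "5"), ("is_provider", "")])]], [(0, 10)])

-- On personalized buckets whose nonempty range starts at a negative index while some node's loss count
-- lands in the wrapped top cells, A silently adds counts from the top of the 300-cell array via Python
-- negative indexing; B counts only losses actually in [max(p,0), q], which is the intended histogram value.
def D_histogram_for_bridge_nodes (nodes_data_list : List (List (String × List (String × String)))) (personalized_buckets : List (Int × Int)) : Prop :=
  (personalized_buckets.any fun b => nodes_data_list.any fun nd => nd.any fun kv =>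
    ((kv.2.lookup "nodes_lost").bind PySem.Int.ofStr?).any fun n =>
      decide (b.1 ≤ n % 300 - 300 ∧ n % 300 - 300 ≤ b.2)) = true

instance (nodes_data_list : List (List (String × List (String × String)))) (personalized_buckets : List (Int × Int)) : Decidable (D_histogram_for_bridge_nodes nodes_data_list personalized_buckets) := by
  unfold D_histogram_for_bridge_nodes; infer_instance

def Spec_histogram_for_bridge_nodes (nodes_data_list : List (List (String × List (String × String)))) (personalized_buckets : List (Int × Int)) (out : List Int × List Int) : Prop :=
  ¬ D_histogram_for_bridge_nodes nodes_data_list personalized_buckets → out = histogram_for_bridge_nodes_alt nodes_data_list personalized_buckets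

instance (nodes_data_list : List (List (String × List (String × String)))) (personalized_buckets : List (Int × Int)) (out : List Int × List Int) : Decidable (Spec_histogram_for_bridge_nodes nodes_data_list personalized_buckets out) := by
  unfold Spec_histogram_for_bridge_nodes; infer_instance

def pvDiffWitness_histogram_for_bridge_nodes : (List (List (String × List (String × String)))) × (List (Int × Int)) :=
  ([[("a", [("nodes_lost", "299"), ("is_provider", "x")])]], [(-1, 0)])

def pvDiffWitnessOut_histogram_for_bridge_nodes : (List Int × List Int) × (List Int × List Int) :=
  (([1], [1]), ([0], [0]))

-- ===== CLAIM =====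
def Claim_unchanged_histogram_for_bridge_nodes : Prop := ∀ (nodes_data_list : List (List (String × List (String × String)))) (personalized_buckets : List (Int × Int)), Dom_histogram_for_bridge_nodes nodes_data_list personalized_buckets → Pre_histogram_for_bridge_nodes nodes_data_list personalized_buckets → Spec_histogram_for_bridge_nodes nodes_data_list personalized_buckets (histogram_for_bridge_nodes nodes_data_list personalized_buckets)

def Claim_changed_histogram_for_bridge_nodes : Prop := Dom_histogram_for_bridge_nodes (pvDiffWitness_histogram_for_bridge_nodes.1) (pvDiffWitness_histogram_for_bridge_nodes.2) ∧ Pre_histogram_for_bridge_nodes (pvDiffWitness_histogram_for_bridge_nodes.1) (pvDiffWitness_histogram_for_bridge_nodes.2) ∧ D_histogram_for_bridge_nodes (pvDiffWitness_histogram_for_bridge_nodes.1) (pvDiffWitness_histogram_for_bridge_nodes.2) ∧ histogram_for_bridge_nodes (pvDiffWitness_histogram_for_bridge_nodes.1) (pvDiffWitness_histogram_for_bridge_nodes.2) = pvDiffWitnessOut_histogram_for_bridge_nodes.1 ∧ histogram_for_bridge_nodes_alt (pvDiffWitness_histogram_for_bridge_nodes.1) (pvDiffWitness_histogram_for_bridge_nodes.2)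 = pvDiffWitnessOut_histogram_for_bridge_nodes.2 ∧ pvDiffWitnessOut_histogram_for_bridge_nodes.1 ≠ pvDiffWitnessOut_histogram_for_bridge_nodes.2

def Claim_exact_histogram_for_bridge_nodes : Prop := ∀ (nodes_data_list : List (List (String × List (String × String)))) (personalized_buckets : List (Int × Int)), Dom_histogram_for_bridge_nodes nodes_data_list personalized_buckets → Pre_histogram_for_bridge_nodes nodes_data_list personalized_buckets → D_histogram_for_bridge_nodes nodes_data_list personalized_buckets → histogram_for_bridge_nodes nodes_data_list personalized_buckets ≠ histogram_for_bridge_nodes_alt nodes_data_list personalized_buckets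

-- ===== LEMMAS AND PROOFS =====
-- the 300-cell array slot the record's count lands in (negative counts wrap from the top)
def pvCell (r : List (String × String)) : Int :=
  ((pvLost r).map (fun n => if n < 0 then n + 300 else n)).getD 0

lemma pv_get?_mk (r : List (String × String)) (k : String) :
    (PySem.Dict.mk r).get? k = r.lookup k := by
  induction r with
  | nil => rfl
  | cons kv rest ih =>
    obtain ⟨a, v⟩ := kv
    rw [PySem.Dict.get?_mk_cons]
    by_cases h : a = k
    · simp [List.lookup, h]
    · have hb : (k == a) = false := by simp; exact Ne.symm h
      simp [List.lookup, h, ih, hb]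

lemma pv_getD_mk (r : List (String × String)) (k : String) (d : String) :
    (PySem.Dict.mk r).getD k d = (r.lookup k).getD d := by
  rw [PySem.Dict.getD_eq_get?_getD, pv_get?_mk]

lemma pv_keys_fold {V σ : Type} (nd : List (String × V)) (dflt : V) (step : σ → String → V → σ)
    (acc : σ) (hnd : (nd.map Prod.fst).Nodup) :
    ((PySem.Dict.mk nd).keys).foldl (fun a k => step a k ((PySem.Dict.mk nd).getD k dflt)) acc
      = nd.foldl (fun a kv => step a kv.1 kv.2) acc := by
  have hkeys : (PySem.Dict.mk nd).keys = nd.map Prod.fst := rfl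
  have h := PySem.Dict.items_eq_map_keys (PySem.Dict.mk nd) (by rw [hkeys]; exact hnd) dflt
  have hitems : (PySem.Dict.mk nd).items = nd := rfl
  rw [hitems, hkeys] at h
  conv_rhs => rw [h]
  rw [List.foldl_map, hkeys]

lemma pv_flat {α σ : Type} (ndl : List (List α)) (f : σ → α → σ) (init : σ) :
    ndl.foldl (fun acc nd => nd.foldl f acc) init = (ndl.flatMap id).foldl f init := by
  induction ndl generalizing init with
  | nil => rfl
  | cons nd rest ih => simp [List.foldl_append, ih]

lemma pySetD_neg {α : Type} (xs : List α) (i : Int) (v : α)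
    (h1 : -(xs.length : Int) ≤ i) (h2 : i < 0) :
    PySem.List.pySetD xs i v = xs.set (xs.length + i).toNat v := by
  simp only [PySem.List.pySetD, PySem.List.pySet?, PySem.List.pyIdx?]
  rw [if_neg (by omega), if_pos (by omega)]
  simp only [Option.map_some, Option.getD_some]
  congr 1
  omega

lemma pyGetD_neg_cell (L : List Int) (hL : L.length = 300) (i : Int)
    (h1 : -300 ≤ i) (h2 : i < 0) :
    PySem.List.pyGetD L i 0 = PySem.List.pyGetD L (i + 300) 0 := by
  have hk : i = -(((-i).toNat : Nat) : Int) := by omega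
  have e1 : PySem.List.pyGetD L i 0 = L[L.length - (-i).toNat]'(by omega) := by
    conv_lhs => rw [hk]
    exact PySem.List.pyGetD_neg_natCast L (-i).toNat 0 (by omega) (by omega)
  have h3 : i + 300 = (((i + 300).toNat : Nat) : Int) := by omega
  rw [e1, h3, PySem.List.pyGetD_natCast, List.getD_eq_getElem _ _ (by omega)]
  congr 1
  omega

def pvStep (acc : List Int × List Int) (rec : List (String × String)) : List Int × List Int :=
  let nodes_lost : Int := (PySem.Int.ofStr? ((PySem.Dict.mk rec).getD "nodes_lost" "")).getD 0
  let b1 := PySem.List.pySetD acc.1 nodes_lost (PySem.List.pyGetD acc.1 nodes_lost 0 + 1)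
  let b2 := if ((PySem.Dict.mk rec).getD "is_provider" "") ≠ "" then
      PySem.List.pySetD acc.2 nodes_lost (PySem.List.pyGetD acc.2 nodes_lost 0 + 1)
    else acc.2
  (b1, b2)

lemma pvStep_len (acc : List Int × List Int) (rec : List (String × String)) :
    (pvStep acc rec).1.length = acc.1.length ∧ (pvStep acc rec).2.length = acc.2.length := by
  unfold pvStep
  refine ⟨PySem.List.length_pySetD _ _ _, ?_⟩
  split <;> simp [PySem.List.length_pySetD]

lemma pvRecOk_lost {r : List (String × String)} (h : pvRecOk r = true) :
    ∃ n : Int, pvLost r = some n ∧ -300 ≤ n ∧ n ≤ 299 ∧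
      (PySem.Int.ofStr? ((PySem.Dict.mk r).getD "nodes_lost" "")).getD 0 = n ∧
      pvCell r = if n < 0 then n + 300 else n := by
  unfold pvRecOk at h
  rcases hL : pvLost r with _ | n
  · rw [hL] at h; simp at h
  · rw [hL] at h
    simp only [Bool.and_eq_true, decide_eq_true_eq] at h
    refine ⟨n, rfl, h.1.1, h.1.2, ?_, ?_⟩
    · rw [pv_getD_mk]
      unfold pvLost at hL
      cases hF : r.lookup "nodes_lost" with
      | none => rw [hF] at hL; simp at hL
      | some s => rw [hF] at hL; simp at hL ⊢; rw [hL]; rfl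
    · unfold pvCell
      rw [hL]
      rfl

lemma pvStep_get_ne (acc : List Int × List Int) (rec : List (String × String)) (c : Nat)
    (hc : c < 300) (hl1 : acc.1.length = 300) (hl2 : acc.2.length = 300)
    (hok : pvRecOk rec = true) (hne : pvCell rec ≠ (c : Int)) :
    PySem.List.pyGetD (pvStep acc rec).1 (c : Int) 0 = PySem.List.pyGetD acc.1 (c : Int) 0 ∧
    PySem.List.pyGetD (pvStep acc rec).2 (c : Int) 0 = PySem.List.pyGetD acc.2 (c : Int) 0 := by
  obtain ⟨n, hL, hn1, hn2, hv, hcell⟩ := pvRecOk_lost hok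
  have key : ∀ (xs : List Int) (w : Int), xs.length = 300 →
      PySem.List.pyGetD (PySem.List.pySetD xs n w) (c : Int) 0 = PySem.List.pyGetD xs (c : Int) 0 := by
    intro xs w hxs
    have hj : (if n < 0 then n + 300 else n) ≠ (c : Int) := hcell ▸ hne
    by_cases hneg : n < 0
    · rw [pySetD_neg xs n w (by omega) hneg]
      rw [PySem.List.pyGetD_natCast, PySem.List.pyGetD_natCast]
      rw [List.getD_eq_getElem _ _ (by simp [hxs]; omega), List.getD_eq_getElem _ _ (by omega)]
      rw [List.getElem_set_ne (by simp at hj ⊢; omega)]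
    · rw [PySem.List.pySetD_of_nonneg xs w (by omega)]
      rw [PySem.List.pyGetD_natCast, PySem.List.pyGetD_natCast]
      rw [List.getD_eq_getElem _ _ (by simp [hxs]; omega), List.getD_eq_getElem _ _ (by omega)]
      rw [List.getElem_set_ne (by simp at hj ⊢; omega)]
  unfold pvStep
  simp only [hv]
  constructor
  · exact key acc.1 _ hl1
  · split
    · exact key acc.2 _ hl2
    · rfl

lemma fold_len (recs : List (String × List (String × String))) (acc : List Int × List Int) :
    (recs.foldl (fun a kv => pvStep a kv.2) acc).1.length = acc.1.length ∧
    (recs.foldl (fun a kv => pvStep a kv.2) acc).2.length = acc.2.length := by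
  induction recs generalizing acc with
  | nil => exact ⟨rfl, rfl⟩
  | cons kv rest ih =>
    simp only [List.foldl_cons]
    obtain ⟨a1, a2⟩ := ih (pvStep acc kv.2)
    obtain ⟨b1, b2⟩ := pvStep_len acc kv.2
    exact ⟨a1.trans b1, a2.trans b2⟩

lemma fold_get_ne (recs : List (String × List (String × String))) (c : Nat) (hc : c < 300)
    (acc : List Int × List Int) (hl1 : acc.1.length = 300) (hl2 : acc.2.length = 300)
    (hok : ∀ kv ∈ recs, pvRecOk kv.2 = true ∧ pvCell kv.2 ≠ (c : Int)) :
    PySem.List.pyGetD (recs.foldl (fun a kv => pvStep a kv.2) acc).1 (c : Int) 0 = PySem.List.pyGetD acc.1 (c : Int) 0 ∧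
    PySem.List.pyGetD (recs.foldl (fun a kv => pvStep a kv.2) acc).2 (c : Int) 0 = PySem.List.pyGetD acc.2 (c : Int) 0 := by
  induction recs generalizing acc with
  | nil => exact ⟨rfl, rfl⟩
  | cons kv rest ih =>
    simp only [List.foldl_cons]
    obtain ⟨hko, hkc⟩ := hok kv (by simp)
    obtain ⟨s1, s2⟩ := pvStep_get_ne acc kv.2 c hc hl1 hl2 hko hkc
    obtain ⟨l1, l2⟩ := pvStep_len acc kv.2
    obtain ⟨i1, i2⟩ := ih (pvStep acc kv.2) (l1.trans hl1) (l2.trans hl2)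
      (fun x hx => hok x (by simp [hx]))
    exact ⟨i1.trans s1, i2.trans s2⟩

def pvPre (s : Int) : List Int → List Int
  | [] => []
  | x :: t => (s + x) :: pvPre (s + x) t

lemma pvPre_fold (L : List Int) (a : List Int) (s : Int) :
    L.foldl (fun pr x => (pr.1 ++ [pr.2 + x], pr.2 + x)) (a, s) = (a ++ pvPre s L, s + L.sum) := by
  induction L generalizing a s with
  | nil => simp [pvPre]
  | cons x t ih =>
    simp only [List.foldl_cons, ih, pvPre, List.sum_cons]
    refine Prod.ext ?_ (by ring_nf)
    simp [List.append_assoc]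

lemma pvPre_getD (L : List Int) (s : Int) (k : Nat) (hk : k < L.length) :
    (pvPre s L).getD k 0 = s + (L.take (k + 1)).sum := by
  induction L generalizing s k with
  | nil => simp at hk
  | cons x t ih =>
    cases k with
    | zero => simp [pvPre]
    | succ m =>
      simp only [pvPre, List.getD_cons_succ, List.take_succ_cons, List.sum_cons]
      rw [ih (s + x) m (by simpa using hk)]
      ring

lemma prefix_get (L : List Int) (k : Int) (h0 : 0 ≤ k) (hk : k ≤ L.length) :
    PySem.List.pyGetD ((0 : Int) :: pvPre 0 L) k 0 = (L.take k.toNat).sum := by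
  have hm : k = ((k.toNat : Nat) : Int) := by omega
  rw [hm, PySem.List.pyGetD_natCast]
  cases hkk : k.toNat with
  | zero => simp
  | succ m =>
    simp only [List.getD_cons_succ]
    rw [pvPre_getD L 0 m (by omega)]
    simp

lemma sum_range_get (L : List Int) (a b : Int) (h0 : 0 ≤ a) (hab : a ≤ b) (hb : b ≤ L.length) :
    ((PySem.List.pyRange a b 1).map (fun i => PySem.List.pyGetD L i 0)).sum
      = (L.take b.toNat).sum - (L.take a.toNat).sum := by
  have hsplit := PySem.List.pyRange_one_append a b (L.length : Int) hab (by exact_mod_cast hb)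
  have h1 : ((PySem.List.pyRange a (L.length : Int) 1).map (fun i => PySem.List.pyGetD L i 0)) = L.drop a.toNat := by
    have := PySem.List.map_pyGetD_pyRange L 0 h0
    simpa [PySem.List.len] using this
  have h2 : ((PySem.List.pyRange b (L.length : Int) 1).map (fun i => PySem.List.pyGetD L i 0)) = L.drop b.toNat := by
    have := PySem.List.map_pyGetD_pyRange L 0 (le_trans h0 hab)
    simpa [PySem.List.len] using this
  have hsum : (L.drop a.toNat).sum = ((PySem.List.pyRange a b 1).map (fun i => PySem.List.pyGetD L i 0)).sum + (L.drop b.toNat).sum := by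
    rw [← h1, ← h2, hsplit]
    simp
  have ta := List.sum_take_add_sum_drop L a.toNat
  have tb := List.sum_take_add_sum_drop L b.toNat
  omega

lemma sum_range_zero (L : List Int) (p e : Int)
    (hz : ∀ i : Int, p ≤ i → i < e → PySem.List.pyGetD L i 0 = 0) :
    ((PySem.List.pyRange p e 1).map (fun i => PySem.List.pyGetD L i 0)).sum = 0 := by
  apply List.sum_eq_zero
  intro x hx
  obtain ⟨i, hi, rfl⟩ := List.mem_map.mp hx
  obtain ⟨hi1, hi2⟩ := PySem.List.mem_pyRange_one.mp hi
  exact hz i hi1 hi2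

lemma pyRange_nil (a b : Int) (h : b ≤ a) : PySem.List.pyRange a b 1 = [] := by
  rw [PySem.List.pyRange_one]
  have : (b - a).toNat = 0 := by omega
  simp [this]

lemma bucket_eq (C1 C2 : List Int) (h1 : C1.length = 300) (h2 : C2.length = 300)
    (p q : Int) (hpre : q < p ∨ (-300 ≤ p ∧ q ≤ 299))
    (hz : ∀ i : Int, p ≤ i → i < 0 → i < q + 1 →
      PySem.List.pyGetD C1 i 0 = 0 ∧ PySem.List.pyGetD C2 i 0 = 0) :
    (PySem.List.pyRange p (q + 1) 1).foldl
        (fun s i => (s.1 + PySem.List.pyGetD C1 i 0, s.2 + PySem.List.pyGetD C2 i 0)) ((0:Int), (0:Int))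
      = (if max p 0 ≤ min q 299 then
          (PySem.List.pyGetD ((0:Int) :: pvPre 0 C1) (min q 299 + 1) 0 - PySem.List.pyGetD ((0:Int) :: pvPre 0 C1) (max p 0) 0,
           PySem.List.pyGetD ((0:Int) :: pvPre 0 C2) (min q 299 + 1) 0 - PySem.List.pyGetD ((0:Int) :: pvPre 0 C2) (max p 0) 0)
        else ((0:Int), (0:Int))) := by
  rw [PySem.List.foldl_prod_mk (fun x i => x + PySem.List.pyGetD C1 i 0) (fun x i => x + PySem.List.pyGetD C2 i 0)]
  rw [PySem.List.foldl_add, PySem.List.foldl_add]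
  simp only [zero_add]
  rcases hpre with hqp | ⟨hp, hq⟩
  · rw [pyRange_nil p (q + 1) (by omega), if_neg (by omega)]
    simp
  · by_cases hp0 : 0 ≤ p
    · by_cases hpq : p ≤ q
      · rw [if_pos (by omega)]
        have hmin : min q 299 = q := by omega
        have hmax : max p 0 = p := by omega
        rw [hmin, hmax]
        rw [sum_range_get C1 p (q+1) hp0 (by omega) (by omega),
            sum_range_get C2 p (q+1) hp0 (by omega) (by omega),
            prefix_get C1 (q+1) (by omega) (by omega), prefix_get C1 p (by omega) (by omega),
            prefix_get C2 (q+1) (by omega) (by omega), prefix_get C2 p (by omega) (by omega)]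
      · rw [pyRange_nil p (q + 1) (by omega), if_neg (by omega)]
        simp
    · rw [not_le] at hp0
      by_cases hq0 : 0 ≤ q
      · rw [if_pos (by omega)]
        have hmin : min q 299 = q := by omega
        have hmax : max p 0 = 0 := by omega
        rw [hmin, hmax]
        rw [PySem.List.pyRange_one_append p 0 (q+1) (by omega) (by omega)]
        simp only [List.map_append, List.sum_append]
        rw [sum_range_zero C1 p 0 (fun i hi1 hi2 => (hz i hi1 hi2 (by omega)).1),
            sum_range_zero C2 p 0 (fun i hi1 hi2 => (hz i hi1 hi2 (by omega)).2)]
        rw [sum_range_get C1 0 (q+1) le_rfl (by omega) (by omega),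
            sum_range_get C2 0 (q+1) le_rfl (by omega) (by omega),
            prefix_get C1 (q+1) (by omega) (by omega), prefix_get C1 0 (by omega) (by omega),
            prefix_get C2 (q+1) (by omega) (by omega), prefix_get C2 0 (by omega) (by omega)]
        simp
      · rw [if_neg (by omega)]
        rw [sum_range_zero C1 p (q+1) (fun i hi1 hi2 => (hz i hi1 (by omega) hi2).1),
            sum_range_zero C2 p (q+1) (fun i hi1 hi2 => (hz i hi1 (by omega) hi2).2)]

lemma counted_A_eq (ndl : List (List (String × List (String × String))))
    (h1 : (ndl.all fun nd => decide ((nd.map Prod.fst).Nodup) && nd.all fun kv => pvRecOk kv.2) = true) :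
    ndl.foldl (fun acc nodes_data =>
      ((PySem.Dict.mk nodes_data).keys).foldl (fun acc node =>
        let nodes_lost : Int :=
          (PySem.Int.ofStr? ((PySem.Dict.mk ((PySem.Dict.mk nodes_data).getD node [])).getD "nodes_lost" "")).getD 0
        let b1 := PySem.List.pySetD acc.1 nodes_lost (PySem.List.pyGetD acc.1 nodes_lost 0 + 1)
        let b2 := if ((PySem.Dict.mk ((PySem.Dict.mk nodes_data).getD node [])).getD "is_provider" "") ≠ "" then
            PySem.List.pySetD acc.2 nodes_lost (PySem.List.pyGetD acc.2 nodes_lost 0 + 1)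
          else acc.2
        (b1, b2)) acc)
      ((PySem.List.pyRange 0 300 1).foldl (fun acc _ => (acc.1 ++ [(0:Int)], acc.2 ++ [(0:Int)])) ([], []))
    = (ndl.flatMap id).foldl (fun a kv => pvStep a kv.2) (List.replicate 300 0, List.replicate 300 0) := by
  have hinit : ((PySem.List.pyRange 0 300 1).foldl (fun acc _ => (acc.1 ++ [(0:Int)], acc.2 ++ [(0:Int)])) (([] : List Int), ([] : List Int)))
      = (List.replicate 300 (0:Int), List.replicate 300 (0:Int)) := by decide
  rw [hinit, ← pv_flat]
  apply PySem.List.foldl_congr_mem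
  intro acc nd hnd
  have hnodup : (nd.map Prod.fst).Nodup := by
    have := (List.all_eq_true.mp h1) nd hnd
    simp only [Bool.and_eq_true, decide_eq_true_eq] at this
    exact this.1
  exact pv_keys_fold nd [] (fun a _ rec => pvStep a rec) acc hnodup

lemma counted_B_eq (ndl : List (List (String × List (String × String)))) :
    ndl.foldl (fun acc nodes_data =>
      ((PySem.Dict.mk nodes_data).items).foldl (fun acc kv =>
        let nodes_lost : Int := (PySem.Int.ofStr? ((PySem.Dict.mk kv.2).getD "nodes_lost" "")).getD 0
        let b1 := PySem.List.pySetD acc.1 nodes_lost (PySem.List.pyGetD acc.1 nodes_lost 0 + 1)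
        let b2 := if ((PySem.Dict.mk kv.2).getD "is_provider" "") ≠ "" then
            PySem.List.pySetD acc.2 nodes_lost (PySem.List.pyGetD acc.2 nodes_lost 0 + 1)
          else acc.2
        (b1, b2)) acc)
      (PySem.List.pyRepeat [(0:Int)] 300, PySem.List.pyRepeat [(0:Int)] 300)
    = (ndl.flatMap id).foldl (fun a kv => pvStep a kv.2) (List.replicate 300 0, List.replicate 300 0) := by
  have hinit : PySem.List.pyRepeat [(0:Int)] 300 = List.replicate 300 (0:Int) := by decide
  rw [hinit, ← pv_flat]
  rfl



def pvR (ndl : List (List (String × List (String × String)))) : List Int × List Int :=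
  (ndl.flatMap id).foldl (fun a kv => pvStep a kv.2) (List.replicate 300 0, List.replicate 300 0)

lemma pvStep_get_self (acc : List Int × List Int) (rec : List (String × String))
    (hl1 : acc.1.length = 300) (hok : pvRecOk rec = true) :
    PySem.List.pyGetD (pvStep acc rec).1 (pvCell rec) 0 = PySem.List.pyGetD acc.1 (pvCell rec) 0 + 1 := by
  obtain ⟨n, hL, hn1, hn2, hv, hcell⟩ := pvRecOk_lost hok
  have hc0 : 0 ≤ pvCell rec := by rw [hcell]; split <;> omega
  have hc3 : pvCell rec < 300 := by rw [hcell]; split <;> omega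
  have hlook : PySem.List.pyGetD acc.1 n 0 = PySem.List.pyGetD acc.1 (pvCell rec) 0 := by
    by_cases hneg : n < 0
    · rw [pyGetD_neg_cell acc.1 hl1 n (by omega) hneg, hcell, if_pos hneg]
    · rw [hcell, if_neg hneg]
  have hset : PySem.List.pySetD acc.1 n (PySem.List.pyGetD acc.1 n 0 + 1)
      = acc.1.set (pvCell rec).toNat (PySem.List.pyGetD acc.1 n 0 + 1) := by
    by_cases hneg : n < 0
    · rw [pySetD_neg acc.1 n _ (by omega) hneg]; congr 1; rw [hcell, if_pos hneg]; omega
    · rw [PySem.List.pySetD_of_nonneg acc.1 _ (by omega)]; congr 1; rw [hcell, if_neg hneg]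
  unfold pvStep
  simp only [hv]
  rw [hset]
  have hcast : pvCell rec = (((pvCell rec).toNat : Nat) : Int) := by omega
  conv_lhs => rw [hcast, PySem.List.pyGetD_natCast]
  simp only [Int.toNat_natCast]
  rw [List.getD_eq_getElem _ _ (by simp [hl1]; omega), List.getElem_set_self, hlook]

lemma pvStep_get_ge (acc : List Int × List Int) (rec : List (String × String)) (c : Nat)
    (hc : c < 300) (hl1 : acc.1.length = 300) (hl2 : acc.2.length = 300) (hok : pvRecOk rec = true) :
    PySem.List.pyGetD acc.1 (c : Int) 0 ≤ PySem.List.pyGetD (pvStep acc rec).1 (c : Int) 0 := by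
  by_cases hcc : pvCell rec = (c : Int)
  · rw [← hcc, pvStep_get_self acc rec hl1 hok]; omega
  · rw [(pvStep_get_ne acc rec c hc hl1 hl2 hok hcc).1]

lemma fold_get_ge (recs : List (String × List (String × String))) (c : Nat) (hc : c < 300)
    (acc : List Int × List Int) (hl1 : acc.1.length = 300) (hl2 : acc.2.length = 300)
    (hok : ∀ kv ∈ recs, pvRecOk kv.2 = true) :
    PySem.List.pyGetD acc.1 (c : Int) 0 ≤
      PySem.List.pyGetD (recs.foldl (fun a kv => pvStep a kv.2) acc).1 (c : Int) 0 := by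
  induction recs generalizing acc with
  | nil => exact le_rfl
  | cons kv rest ih =>
    simp only [List.foldl_cons]
    obtain ⟨l1, l2⟩ := pvStep_len acc kv.2
    exact le_trans (pvStep_get_ge acc kv.2 c hc hl1 hl2 (hok kv (by simp)))
      (ih (pvStep acc kv.2) (l1.trans hl1) (l2.trans hl2) (fun x hx => hok x (by simp [hx])))

lemma fold_get_nonneg (recs : List (String × List (String × String))) (c : Nat) (hc : c < 300)
    (hok : ∀ kv ∈ recs, pvRecOk kv.2 = true) :
    0 ≤ PySem.List.pyGetD ((recs.foldl (fun a kv => pvStep a kv.2)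
      (List.replicate 300 (0:Int), List.replicate 300 (0:Int)))).1 (c : Int) 0 := by
  refine le_trans ?_ (fold_get_ge recs c hc _ (by simp) (by simp) hok)
  rw [PySem.List.pyGetD_natCast, List.getD_eq_getElem?_getD, List.getElem?_replicate]
  split <;> simp

lemma fold_get_hit (recs : List (String × List (String × String)))
    (kv : String × List (String × String)) (hkv : kv ∈ recs)
    (hok : ∀ x ∈ recs, pvRecOk x.2 = true) :
    1 ≤ PySem.List.pyGetD ((recs.foldl (fun a kv => pvStep a kv.2)
      (List.replicate 300 (0:Int), List.replicate 300 (0:Int)))).1 (pvCell kv.2) 0 := by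
  obtain ⟨n, hL, hn1, hn2, hv, hcell⟩ := pvRecOk_lost (hok kv hkv)
  have hc0 : 0 ≤ pvCell kv.2 := by rw [hcell]; split <;> omega
  have hc3 : pvCell kv.2 < 300 := by rw [hcell]; split <;> omega
  obtain ⟨l1, l2, rfl⟩ := List.append_of_mem hkv
  rw [List.foldl_append, List.foldl_cons]
  set acc1 := l1.foldl (fun a kv => pvStep a kv.2) (List.replicate 300 (0:Int), List.replicate 300 (0:Int)) with hacc1
  have hl1 : acc1.1.length = 300 := (fold_len _ _).1.trans (by simp)
  have hl2 : acc1.2.length = 300 := (fold_len _ _).2.trans (by simp)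
  have hcastc : (((pvCell kv.2).toNat : Nat) : Int) = pvCell kv.2 := by omega
  have hnn : 0 ≤ PySem.List.pyGetD acc1.1 (pvCell kv.2) 0 := by
    have := fold_get_nonneg l1 (pvCell kv.2).toNat (by omega) (fun x hx => hok x (by simp [hx]))
    rwa [hcastc] at this
  have hstep : PySem.List.pyGetD (pvStep acc1 kv.2).1 (pvCell kv.2) 0
      = PySem.List.pyGetD acc1.1 (pvCell kv.2) 0 + 1 := pvStep_get_self acc1 kv.2 hl1 (hok kv hkv)
  obtain ⟨s1, s2⟩ := pvStep_len acc1 kv.2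
  have hge := fold_get_ge l2 (pvCell kv.2).toNat (by omega) (pvStep acc1 kv.2) (s1.trans hl1) (s2.trans hl2)
      (fun x hx => hok x (by simp [hx]))
  rw [hcastc] at hge
  omega

lemma final_A (C : List Int × List Int) (pb : List (Int × Int)) (a1 a2 : List Int) :
    pb.foldl (fun acc b =>
      (acc.1 ++ [((PySem.List.pyRange b.1 (b.2 + 1) 1).foldl
          (fun s i => (s.1 + PySem.List.pyGetD C.1 i 0, s.2 + PySem.List.pyGetD C.2 i 0)) ((0:Int), (0:Int))).1],
       acc.2 ++ [((PySem.List.pyRange b.1 (b.2 + 1) 1).foldl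
          (fun s i => (s.1 + PySem.List.pyGetD C.1 i 0, s.2 + PySem.List.pyGetD C.2 i 0)) ((0:Int), (0:Int))).2])) (a1, a2)
    = (a1 ++ pb.map (fun b => ((PySem.List.pyRange b.1 (b.2 + 1) 1).map (fun i => PySem.List.pyGetD C.1 i 0)).sum),
       a2 ++ pb.map (fun b => ((PySem.List.pyRange b.1 (b.2 + 1) 1).map (fun i => PySem.List.pyGetD C.2 i 0)).sum)) := by
  induction pb generalizing a1 a2 with
  | nil => simp
  | cons b rest ih =>
    simp only [List.foldl_cons, List.map_cons]
    rw [PySem.List.foldl_prod_mk (fun x i => x + PySem.List.pyGetD C.1 i 0) (fun x i => x + PySem.List.pyGetD C.2 i 0),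
        PySem.List.foldl_add, PySem.List.foldl_add]
    rw [ih]
    simp [List.append_assoc]

lemma final_B (P1 P2 : List Int) (pb : List (Int × Int)) (a1 a2 : List Int) :
    pb.foldl (fun acc b =>
      if max b.1 0 ≤ min b.2 299 then
        (acc.1 ++ [PySem.List.pyGetD P1 (min b.2 299 + 1) 0 - PySem.List.pyGetD P1 (max b.1 0) 0],
         acc.2 ++ [PySem.List.pyGetD P2 (min b.2 299 + 1) 0 - PySem.List.pyGetD P2 (max b.1 0) 0])
      else (acc.1 ++ [(0:Int)], acc.2 ++ [(0:Int)])) (a1, a2)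
    = (a1 ++ pb.map (fun b => if max b.1 0 ≤ min b.2 299 then
          PySem.List.pyGetD P1 (min b.2 299 + 1) 0 - PySem.List.pyGetD P1 (max b.1 0) 0 else 0),
       a2 ++ pb.map (fun b => if max b.1 0 ≤ min b.2 299 then
          PySem.List.pyGetD P2 (min b.2 299 + 1) 0 - PySem.List.pyGetD P2 (max b.1 0) 0 else 0)) := by
  induction pb generalizing a1 a2 with
  | nil => simp
  | cons b rest ih =>
    simp only [List.foldl_cons, List.map_cons]
    by_cases hc : max b.1 0 ≤ min b.2 299 <;>
      simp only [hc, if_true, if_false] <;> rw [ih] <;> simp [List.append_assoc]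

lemma portA_map (ndl : List (List (String × List (String × String)))) (pb : List (Int × Int))
    (h1 : (ndl.all fun nd => decide ((nd.map Prod.fst).Nodup) && nd.all fun kv => pvRecOk kv.2) = true) :
    histogram_for_bridge_nodes ndl pb
      = (pb.map (fun b => ((PySem.List.pyRange b.1 (b.2 + 1) 1).map (fun i => PySem.List.pyGetD (pvR ndl).1 i 0)).sum),
         pb.map (fun b => ((PySem.List.pyRange b.1 (b.2 + 1) 1).map (fun i => PySem.List.pyGetD (pvR ndl).2 i 0)).sum)) := by
  unfold histogram_for_bridge_nodes
  dsimp only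
  rw [counted_A_eq ndl h1]
  exact final_A _ pb [] []

lemma portB_map (ndl : List (List (String × List (String × String)))) (pb : List (Int × Int)) :
    histogram_for_bridge_nodes_alt ndl pb
      = (pb.map (fun b => if max b.1 0 ≤ min b.2 299 then
            PySem.List.pyGetD ((0:Int) :: pvPre 0 (pvR ndl).1) (min b.2 299 + 1) 0
              - PySem.List.pyGetD ((0:Int) :: pvPre 0 (pvR ndl).1) (max b.1 0) 0 else 0),
         pb.map (fun b => if max b.1 0 ≤ min b.2 299 then
            PySem.List.pyGetD ((0:Int) :: pvPre 0 (pvR ndl).2) (min b.2 299 + 1) 0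
              - PySem.List.pyGetD ((0:Int) :: pvPre 0 (pvR ndl).2) (max b.1 0) 0 else 0)) := by
  unfold histogram_for_bridge_nodes_alt
  dsimp only
  rw [counted_B_eq ndl]
  have hpv : List.foldl (fun a kv => pvStep a kv.2)
      (List.replicate 300 (0:Int), List.replicate 300 (0:Int)) (List.flatMap id ndl) = pvR ndl := rfl
  rw [hpv, pvPre_fold (pvR ndl).1 [0] 0, pvPre_fold (pvR ndl).2 [0] 0]
  dsimp only
  simp only [List.singleton_append]
  exact final_B _ _ pb [] []

-- ===== VERDICT =====
theorem histogram_for_bridge_nodes_spec : Claim_unchanged_histogram_for_bridge_nodes := by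
  intro ndl pb _ hPre hND
  obtain ⟨hPre1, hPre2⟩ := hPre
  show histogram_for_bridge_nodes ndl pb = histogram_for_bridge_nodes_alt ndl pb
  unfold histogram_for_bridge_nodes histogram_for_bridge_nodes_alt
  dsimp only
  rw [counted_A_eq ndl hPre1, counted_B_eq ndl]
  set R := (ndl.flatMap id).foldl (fun a kv => pvStep a kv.2)
      (List.replicate 300 (0:Int), List.replicate 300 (0:Int)) with hR
  have hlen1 : R.1.length = 300 := by
    rw [hR]; exact ((fold_len _ _).1).trans (by simp)
  have hlen2 : R.2.length = 300 := by
    rw [hR]; exact ((fold_len _ _).2).trans (by simp)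
  rw [pvPre_fold R.1 [0] 0, pvPre_fold R.2 [0] 0]
  dsimp only
  simp only [List.singleton_append]
  have hallok : ∀ kv ∈ ndl.flatMap id, pvRecOk kv.2 = true := by
    intro kv hkv
    obtain ⟨nd, hnd, hkv'⟩ := List.mem_flatMap.mp hkv
    have := (List.all_eq_true.mp hPre1) nd hnd
    simp only [Bool.and_eq_true, decide_eq_true_eq] at this
    exact (List.all_eq_true.mp this.2) kv hkv'
  have hDfalse : (pb.any fun b => ndl.any fun nd => nd.any fun kv =>
      ((kv.2.lookup "nodes_lost").bind PySem.Int.ofStr?).any fun n =>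
        decide (b.1 ≤ n % 300 - 300 ∧ n % 300 - 300 ≤ b.2)) = false := by
    revert hND
    unfold D_histogram_for_bridge_nodes
    cases h : (pb.any _) <;> simp_all
  apply PySem.List.foldl_congr_mem
  intro acc b hb
  have hbpre : b.2 < b.1 ∨ (-300 ≤ b.1 ∧ b.2 ≤ 299) := by
    have := (List.all_eq_true.mp hPre2) b hb
    simp only [Bool.or_eq_true, Bool.and_eq_true, decide_eq_true_eq] at this
    tauto
  have hz : ∀ i : Int, b.1 ≤ i → i < 0 → i < b.2 + 1 →
      PySem.List.pyGetD R.1 i 0 = 0 ∧ PySem.List.pyGetD R.2 i 0 = 0 := by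
    intro i hi1 hi2 hi3
    have hbf := Bool.eq_false_iff.mpr ((List.any_eq_false.mp hDfalse) b hb)
    have hcells : ∀ kv ∈ ndl.flatMap id, pvCell kv.2 ≠ i + 300 := by
      intro kv hkv hceq
      obtain ⟨nd, hnd, hkv'⟩ := List.mem_flatMap.mp hkv
      have h1 := Bool.eq_false_iff.mpr ((List.any_eq_false.mp hbf) nd hnd)
      have h2 := Bool.eq_false_iff.mpr ((List.any_eq_false.mp h1) kv hkv')
      obtain ⟨n, hL, hn1, hn2, hv, hcell⟩ := pvRecOk_lost (hallok kv hkv)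
      rw [show ((kv.2.lookup "nodes_lost").bind PySem.Int.ofStr?) = pvLost kv.2 from rfl, hL] at h2
      simp only [Option.any_some, decide_eq_false_iff_not] at h2
      have hmod : (if n < 0 then n + 300 else n) = n % 300 := by split <;> omega
      rw [hcell, hmod] at hceq
      omega
    have hcast : i + 300 = (((i + 300).toNat : Nat) : Int) := by omega
    constructor
    · rw [pyGetD_neg_cell R.1 hlen1 i (by omega) hi2, hcast]
      refine ((fold_get_ne (ndl.flatMap id) (i + 300).toNat (by omega) _ (by simp) (by simp)
        (fun kv hkv => ⟨hallok kv hkv, by rw [← hcast]; exact hcells kv hkv⟩)).1).trans ?_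
      rw [PySem.List.pyGetD_natCast, List.getD_eq_getElem?_getD, List.getElem?_replicate]
      split <;> rfl
    · rw [pyGetD_neg_cell R.2 hlen2 i (by omega) hi2, hcast]
      refine ((fold_get_ne (ndl.flatMap id) (i + 300).toNat (by omega) _ (by simp) (by simp)
        (fun kv hkv => ⟨hallok kv hkv, by rw [← hcast]; exact hcells kv hkv⟩)).2).trans ?_
      rw [PySem.List.pyGetD_natCast, List.getD_eq_getElem?_getD, List.getElem?_replicate]
      split <;> rfl
  rw [bucket_eq R.1 R.2 hlen1 hlen2 b.1 b.2 hbpre hz]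
  by_cases hcond : max b.1 0 ≤ min b.2 299 <;> simp [hcond]

theorem histogram_for_bridge_nodes_changed : Claim_changed_histogram_for_bridge_nodes := by
  unfold Claim_changed_histogram_for_bridge_nodes; decide

theorem histogram_for_bridge_nodes_tight : Claim_exact_histogram_for_bridge_nodes := by
  intro ndl pb _ hPre hD heq
  obtain ⟨hPre1, hPre2⟩ := hPre
  have hallok : ∀ x ∈ ndl.flatMap id, pvRecOk x.2 = true := by
    intro kv hkv
    obtain ⟨nd, hnd, hkv'⟩ := List.mem_flatMap.mp hkv
    have := (List.all_eq_true.mp hPre1) nd hnd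
    simp only [Bool.and_eq_true, decide_eq_true_eq] at this
    exact (List.all_eq_true.mp this.2) kv hkv'
  unfold D_histogram_for_bridge_nodes at hD
  obtain ⟨b, hb, hD1⟩ := List.any_eq_true.mp hD
  obtain ⟨nd, hnd, hD2⟩ := List.any_eq_true.mp hD1
  obtain ⟨kv, hkv', hD3⟩ := List.any_eq_true.mp hD2
  have hkv : kv ∈ ndl.flatMap id := List.mem_flatMap.mpr ⟨nd, hnd, hkv'⟩
  obtain ⟨n, hL, hn1, hn2, hv, hcell⟩ := pvRecOk_lost (hallok kv hkv)
  rw [show ((kv.2.lookup "nodes_lost").bind PySem.Int.ofStr?) = pvLost kv.2 from rfl, hL] at hD3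
  simp only [Option.any_some, decide_eq_true_eq] at hD3
  obtain ⟨hwp, hwq⟩ := hD3
  have hbpre : -300 ≤ b.1 ∧ b.2 ≤ 299 := by
    have := (List.all_eq_true.mp hPre2) b hb
    simp only [Bool.or_eq_true, Bool.and_eq_true, decide_eq_true_eq] at this
    rcases this with h | h
    · omega
    · exact h
  rw [portA_map ndl pb hPre1, portB_map ndl pb] at heq
  injection heq with h1 h2
  have heqb := List.map_eq_map_iff.mp h1 b hb
  -- facts about the count array
  have hlenC : (pvR ndl).1.length = 300 := (fold_len _ _).1.trans (by simp)
  have hcellmod : pvCell kv.2 = n % 300 := by rw [hcell]; split <;> omega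
  have hpos : 1 ≤ PySem.List.pyGetD (pvR ndl).1 (n % 300 - 300) 0 := by
    rw [pyGetD_neg_cell (pvR ndl).1 hlenC _ (by omega) (by omega)]
    have : n % 300 - 300 + 300 = pvCell kv.2 := by omega
    rw [this]
    exact fold_get_hit _ kv hkv hallok
  have hnnneg : ∀ i : Int, -300 ≤ i → i < 0 → 0 ≤ PySem.List.pyGetD (pvR ndl).1 i 0 := by
    intro i h1' h2'
    rw [pyGetD_neg_cell (pvR ndl).1 hlenC i h1' h2',
        show i + 300 = (((i + 300).toNat : Nat) : Int) by omega]
    exact fold_get_nonneg _ _ (by omega) hallok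
  by_cases hq : 0 ≤ b.2
  · -- bucket reaches into the nonnegative cells: A = wrapped + main, B = main
    rw [if_pos (by omega)] at heqb
    rw [PySem.List.pyRange_one_append b.1 0 (b.2 + 1) (by omega) (by omega),
        List.map_append, List.sum_append] at heqb
    have hmin : min b.2 299 = b.2 := by omega
    have hmax : max b.1 0 = 0 := by omega
    rw [hmin, hmax,
        prefix_get (pvR ndl).1 (b.2 + 1) (by omega) (by omega),
        prefix_get (pvR ndl).1 0 (by omega) (by omega),
        sum_range_get (pvR ndl).1 0 (b.2 + 1) le_rfl (by omega) (by omega)] at heqb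
    have hwrap : ((PySem.List.pyRange b.1 0 1).map (fun i => PySem.List.pyGetD (pvR ndl).1 i 0)).sum
        ≥ PySem.List.pyGetD (pvR ndl).1 (n % 300 - 300) 0 := by
      apply List.single_le_sum
      · intro x hx
        obtain ⟨i, hi, rfl⟩ := List.mem_map.mp hx
        obtain ⟨hi1, hi2⟩ := PySem.List.mem_pyRange_one.mp hi
        exact hnnneg i (by omega) hi2
      · exact List.mem_map.mpr ⟨n % 300 - 300, PySem.List.mem_pyRange_one.mpr (by omega), rfl⟩
    simp at heqb
    omega
  · -- bucket entirely in the wrapped cells: A ≥ 1, B = 0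
    rw [if_neg (by omega)] at heqb
    have hwrap : ((PySem.List.pyRange b.1 (b.2 + 1) 1).map (fun i => PySem.List.pyGetD (pvR ndl).1 i 0)).sum
        ≥ PySem.List.pyGetD (pvR ndl).1 (n % 300 - 300) 0 := by
      apply List.single_le_sum
      · intro x hx
        obtain ⟨i, hi, rfl⟩ := List.mem_map.mp hx
        obtain ⟨hi1, hi2⟩ := PySem.List.mem_pyRange_one.mp hi
        exact hnnneg i (by omega) (by omega)
      · exact List.mem_map.mpr ⟨n % 300 - 300, PySem.List.mem_pyRange_one.mpr (by omega), rfl⟩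
    omega
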